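-- pv_equiv track=rewrite | github.com/EsterAdinolfi/Progetto_AeSD_Adinolfi_Facchetti | da_eseguire/utility.py | is_small_matrix
-- ===== SOURCE A (Python) =====
-- def is_small_matrix(rows):
--     """
--     Determina se una matrice è "piccola" e quindi adatta al solver seriale.
--
--     Usa gli stessi criteri di categorizzazione definiti in matrices_selection.py
--     per garantire coerenza con il sistema di classificazione delle matrici.
--
--     Una matrice viene considerata piccola (e quindi eseguita in modalità seriale) se:
--     - È trivial: N≤1 o M'≤1 (soluzioni banali, istantanee)
--     - È tiny: N≤3 e M'≤15 (< 1 secondo)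
--     - È small: N≤5 e M'≤30 (< 10 secondi)
--
--     Per matrici più grandi (medium, large, xlarge) viene usato il solver parallelo.
--
--     Args:
--         rows: matrice binaria (lista di liste)
--
--     Returns:
--         True se la matrice è piccola (seriale), False se è grande (parallelo)
--     """
--     if not rows:
--         return True
--
--     num_rows = len(rows)
--     num_cols_original = len(rows[0]) if rows else 0
--
--     # Conta colonne non vuote (M_ridotto)
--     non_empty_cols = 0
--     for j in range(num_cols_original):
--         if any(rows[i][j] == 1 for i in range(num_rows)):
--             non_empty_cols += 1
--
--     # Criteri allineati con matrices_selection.py: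
--
--     # 1. Trivial: banali (1 riga o 1 colonna ridotta)
--     if num_rows <= 1 or non_empty_cols <= 1:
--         return True
--
--     # 2. Tiny: molto piccole (completabili in < 1 secondo)
--     if num_rows <= 3 and non_empty_cols <= 15:
--         return True
--
--     # 3. Small: piccole (completabili in < 10 secondi)
--     if num_rows <= 5 and non_empty_cols <= 30:
--         return True
--
--     # Tutte le altre (medium, large, xlarge) usano parallelo
--     return False
-- ===== SOURCE B (Python) =====
-- def is_small_matrix(rows):
--     if not rows:
--         return True
--     # Fold the rows into a boolean column-occupancy vector by elementwise OR, then sum it.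
--     occupied = [False] * len(rows[0])
--     for row in rows:
--         occupied = [seen or row[j] == 1 for j, seen in enumerate(occupied)]
--     non_empty_cols = sum(occupied)
--     num_rows = len(rows)
--     return (num_rows <= 1 or non_empty_cols <= 1
--             or (num_rows <= 3 and non_empty_cols <= 15)
--             or (num_rows <= 5 and non_empty_cols <= 30))
-- ===== Notes on version B (the rewrite author's own statement) =====
-- stated objective: alternative
-- what changed: Replaces A's column-major per-column any() scan with a counter by a row-major reduction: the rows are folded into a single boolean column-occupancy vector by elementwise OR (one list comprehension per row), which is then summed; the single row-major pass avoids creating a Python generator per column, a constant-factor speedup.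
-- outside the precondition, e.g. on is_small_matrix([[1, 1], [1]]): A returns True, B returns True
import Mathlib
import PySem

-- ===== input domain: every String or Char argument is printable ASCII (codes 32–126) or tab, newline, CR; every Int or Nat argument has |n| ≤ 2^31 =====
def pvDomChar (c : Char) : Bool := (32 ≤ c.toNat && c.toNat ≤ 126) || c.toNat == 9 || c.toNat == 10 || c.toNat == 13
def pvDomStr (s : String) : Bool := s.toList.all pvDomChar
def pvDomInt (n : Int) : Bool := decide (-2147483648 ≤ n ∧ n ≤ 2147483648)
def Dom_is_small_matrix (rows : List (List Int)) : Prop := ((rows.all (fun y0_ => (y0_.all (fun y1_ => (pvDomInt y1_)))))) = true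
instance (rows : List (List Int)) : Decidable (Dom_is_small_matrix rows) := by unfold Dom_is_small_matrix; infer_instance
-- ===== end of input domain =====

-- B replaces A's column-major per-column any() scan with a row-major fold of the rows
-- into a boolean column-occupancy vector (elementwise OR) that is then summed (alternative).

-- ===== PORT A =====
def is_small_matrix (rows : List (List Int)) : Bool :=
  if rows = [] then true
  else
    let num_rows : Int := rows.length
    let num_cols_original : Int := (PySem.List.pyGetD rows 0 []).length
    let non_empty_cols : Int :=
      (PySem.List.pyRange 0 num_cols_original).foldl (fun acc j =>
        if (PySem.List.pyRange 0 num_rows).any (fun i =>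
            PySem.List.pyGetD (PySem.List.pyGetD rows i []) j 0 == 1)
        then acc + 1 else acc) 0
    if num_rows ≤ 1 ∨ non_empty_cols ≤ 1 then true
    else if num_rows ≤ 3 ∧ non_empty_cols ≤ 15 then true
    else if num_rows ≤ 5 ∧ non_empty_cols ≤ 30 then true
    else false

-- ===== PORT B =====
def is_small_matrix_alt (rows : List (List Int)) : Bool :=
  if rows = [] then true
  else
    let occ0 : List Bool := List.replicate (PySem.List.pyGetD rows 0 []).length false
    let occupied : List Bool := rows.foldl (fun occ row =>
      (PySem.List.enumerate occ).map (fun p => p.2 || (PySem.List.pyGetD row p.1 0 == 1))) occ0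
    let non_empty_cols : Int := (occupied.countP id : Nat)
    let num_rows : Int := rows.length
    decide (num_rows ≤ 1 ∨ non_empty_cols ≤ 1 ∨ (num_rows ≤ 3 ∧ non_empty_cols ≤ 15)
            ∨ (num_rows ≤ 5 ∧ non_empty_cols ≤ 30))

-- ===== PRECONDITION & SPEC =====
-- Pre_ excludes ragged matrices (a row shorter than row 0): there the Python versions'
-- short-circuiting scans raise IndexError or return only by the accident of an earlier 1.
def Pre_is_small_matrix (rows : List (List Int)) : Prop :=
  ∀ r ∈ rows, (rows.headD []).length ≤ r.length
instance (rows : List (List Int)) : Decidable (Pre_is_small_matrix rows) := by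
  unfold Pre_is_small_matrix; infer_instance

def pvWitness_is_small_matrix : List (List Int) := [[1, 0], [0, 1]]

def Spec_is_small_matrix (rows : List (List Int)) (out : Bool) : Prop := out = is_small_matrix_alt rows
instance (rows : List (List Int)) (out : Bool) : Decidable (Spec_is_small_matrix rows out) := by unfold Spec_is_small_matrix; infer_instance

-- ===== CLAIM (what is proved, stated in full; the proofs are below) =====
def Claim_equal_is_small_matrix : Prop := ∀ (rows : List (List Int)), Dom_is_small_matrix rows → Pre_is_small_matrix rows → Spec_is_small_matrix rows (is_small_matrix rows)

-- ===== LEMMAS AND PROOFS =====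

-- one step of B's fold, elementwise
lemma step_getD (occ : List Bool) (row : List Int) (k : Nat) (hk : k < occ.length) :
    ((PySem.List.enumerate occ).map
        (fun p => p.2 || (PySem.List.pyGetD row p.1 0 == 1))).getD k false
      = (occ.getD k false || (PySem.List.pyGetD row (k : Int) 0 == 1)) := by
  have hl : k < ((PySem.List.enumerate occ).map
      (fun p => p.2 || (PySem.List.pyGetD row p.1 0 == 1))).length := by
    simp [PySem.List.length_enumerate, hk]
  rw [List.getD_eq_getElem _ _ hl, List.getElem_map, PySem.List.getElem_enumerate,
    List.getD_eq_getElem _ _ hk]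
  simp


-- B's fold preserves the vector length
lemma fold_len (rows : List (List Int)) (occ : List Bool) :
    (rows.foldl (fun occ row =>
      (PySem.List.enumerate occ).map
        (fun p => p.2 || (PySem.List.pyGetD row p.1 0 == 1))) occ).length = occ.length := by
  induction rows generalizing occ with
  | nil => rfl
  | cons r rs ih =>
    simp only [List.foldl_cons]
    rw [ih]
    simp [PySem.List.length_enumerate]


-- B's fold, elementwise: column k is occupied iff some row has a 1 there
lemma fold_getD (rows : List (List Int)) (occ : List Bool) (k : Nat) (hk : k < occ.length) :
    (rows.foldl (fun occ row =>
      (PySem.List.enumerate occ).map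
        (fun p => p.2 || (PySem.List.pyGetD row p.1 0 == 1))) occ).getD k false
      = (occ.getD k false || rows.any (fun row => PySem.List.pyGetD row (k : Int) 0 == 1)) := by
  induction rows generalizing occ with
  | nil => simp
  | cons r rs ih =>
    simp only [List.foldl_cons, List.any_cons]
    rw [ih _ (by simpa [PySem.List.length_enumerate] using hk), step_getD occ r k hk,
      Bool.or_assoc]


-- counting trues = counting indices that hold true
lemma countP_id_getD (bs : List Bool) :
    bs.countP id = (List.range bs.length).countP (fun k => bs.getD k false) := by
  induction bs with
  | nil => simp
  | cons b xs ih =>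
    simp [List.countP_cons, List.range_succ_eq_map, List.countP_map, Function.comp_def,
      List.getElem?_cons_succ, ih]


-- A's inner per-column any over row indices is an any over the rows themselves
lemma anyA (rows : List (List Int)) (j : Int) :
    ((PySem.List.pyRange 0 (rows.length : Int)).any (fun i =>
        PySem.List.pyGetD (PySem.List.pyGetD rows i []) j 0 == 1))
      = rows.any (fun row => PySem.List.pyGetD row j 0 == 1) := by
  conv_rhs => rw [← PySem.List.map_pyGetD_pyRange_zero' rows ([] : List Int)]
  rw [List.any_map]
  simp [Function.comp_def]

-- the two counts agree
lemma counts_eq (rows : List (List Int)) :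
    ((PySem.List.pyRange 0 (((PySem.List.pyGetD rows 0 []).length : Nat) : Int)).foldl
        (fun acc j =>
          if (PySem.List.pyRange 0 (rows.length : Int)).any (fun i =>
              PySem.List.pyGetD (PySem.List.pyGetD rows i []) j 0 == 1)
          then acc + 1 else acc) 0) =
      (((rows.foldl (fun occ row =>
          (PySem.List.enumerate occ).map
            (fun p => p.2 || (PySem.List.pyGetD row p.1 0 == 1)))
          (List.replicate (PySem.List.pyGetD rows 0 []).length false)).countP id : Nat) : Int) := by
  rw [PySem.List.foldl_if_add_one, zero_add]
  have h1 : ∀ j ∈ PySem.List.pyRange 0 (((PySem.List.pyGetD rows 0 []).length : Nat) : Int),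
      ((PySem.List.pyRange 0 (rows.length : Int)).any (fun i =>
          PySem.List.pyGetD (PySem.List.pyGetD rows i []) j 0 == 1))
        = true ↔ rows.any (fun row => PySem.List.pyGetD row j 0 == 1) = true :=
    fun j _ => by rw [anyA]
  rw [List.countP_congr h1, PySem.List.pyRange_zero_natCast, List.countP_map]
  rw [countP_id_getD, fold_len, List.length_replicate]
  congr 1
  apply List.countP_congr
  intro k hk
  have hkm : k < (PySem.List.pyGetD rows 0 []).length := by simpa using List.mem_range.mp hk
  rw [Function.comp_apply, fold_getD _ _ k (by simp only [List.length_replicate]; exact hkm), List.getD_replicate,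
    Bool.false_or]
  exact hkm

-- ===== VERDICT (by name: the statement is the Claim_ definition above) =====
theorem is_small_matrix_spec : Claim_equal_is_small_matrix := by
  intro rows _ _
  unfold Spec_is_small_matrix is_small_matrix is_small_matrix_alt
  by_cases hne : rows = []
  · simp [hne]
  · simp only [hne, if_false]
    have hc := counts_eq rows
    rw [show (((PySem.List.pyGetD rows 0 []).length : Nat) : Int)
        = ((PySem.List.pyGetD rows 0 []).length : Int) from rfl] at hc
    rw [hc]
    split_ifs with h1 h2 h3 <;> simp_all <;> omega
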